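-- pv_equiv track=rewrite | github.com/XSherlockX/Compiler | CompilerPart1/Compiler_Token Manager.py | Adad_ashari
-- ===== SOURCE A (Python) =====
-- def token(Type):
--     state = Type
--     match state:
--         case "ID":
--             return "TK_ID"
--         case "when":
--             return "TK_when"
--         case "loop-un":
--             return "TK_loop-un"
--         case "loop":
--             return "TK_loop"
--         case "make":
--             return "TK_make"
--         case "call":
--             return "TK_call"
--         case "Assign":
--             return "TK_Assign"
--         case "Float":
--             return "TK_Float"
--         case "nope":
--             return "TK_nope"
--         case "=":
--             return "TK_="
--         case "+":
--             return "TK_+"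
--         case "-":
--             return "TK_-"
--         case "*":
--             return "TK_*"
--         case "%":
--             return "TK_%"
--         case "=":
--             return "ALIGN_TK"
--         case ">":
--             return "TK_>"
--         case "<":
--             return "TK_<"
--         case "INT":
--             return "TK_INT"
--
-- def Adad_ashari(lexeme):
--     state = 1
--     i = 0
--     length = len(lexeme)
--
--     while i < length:
--         c = lexeme[i]
--         match state:
--             case 1:
--                 if c.isdigit():
--                     state = 2
--                 else:
--                     state = 5
--             case 2:
--                 if c.isdigit():
--                     state = 2
--                 elif c == '/':
--                     state = 3
--                 else:
--                     state = 5
--             case 3: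
--                 if c.isdigit():
--                     state = 4
--                 else:
--                     state = 5
--             case 4:
--                 if c.isdigit():
--                     state = 4
--                 else:
--                     state = 5
--             case 5:
--                 return False
--         i += 1
--
--     if state == 4:
--         return token("Float")
--     else:
--         return False
-- ===== SOURCE B (Python) =====
-- def token(Type):
--     state = Type
--     match state:
--         case "ID":
--             return "TK_ID"
--         case "when":
--             return "TK_when"
--         case "loop-un":
--             return "TK_loop-un"
--         case "loop":
--             return "TK_loop"
--         case "make":
--             return "TK_make"
--         case "call":
--             return "TK_call"
--         case "Assign":
--             return "TK_Assign"
--         case "Float":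
--             return "TK_Float"
--         case "nope":
--             return "TK_nope"
--         case "=":
--             return "TK_="
--         case "+":
--             return "TK_+"
--         case "-":
--             return "TK_-"
--         case "*":
--             return "TK_*"
--         case "%":
--             return "TK_%"
--         case ">":
--             return "TK_>"
--         case "<":
--             return "TK_<"
--         case "INT":
--             return "TK_INT"
--
-- def Adad_ashari(lexeme):
--     i = lexeme.find('/')
--     if i != -1 and lexeme[:i].isdigit() and lexeme[i+1:].isdigit():
--         return token("Float")
--     return False
-- ===== Notes on version B (the rewrite author's own statement) =====
-- stated objective: simpler
-- what changed: Replaced the 5-state DFA loop with locate-and-validate: str.find locates the slash separator, then str.isdigit checks that the slices before and after it are non-empty all-digit strings.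
import Mathlib
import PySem

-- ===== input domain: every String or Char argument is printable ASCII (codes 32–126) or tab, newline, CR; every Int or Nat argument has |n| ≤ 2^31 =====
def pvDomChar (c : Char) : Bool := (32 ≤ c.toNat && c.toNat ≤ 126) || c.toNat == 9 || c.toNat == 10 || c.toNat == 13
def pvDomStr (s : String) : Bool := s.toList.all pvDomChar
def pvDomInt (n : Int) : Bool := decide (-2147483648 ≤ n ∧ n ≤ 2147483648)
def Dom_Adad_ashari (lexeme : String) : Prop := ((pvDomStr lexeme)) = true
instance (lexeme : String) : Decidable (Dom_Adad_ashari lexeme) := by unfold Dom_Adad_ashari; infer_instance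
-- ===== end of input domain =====

-- B replaces A's 5-state DFA loop by locating the slash with find and validating the two slices with isdigit (simpler).

-- ===== PORT A =====
-- the while loop of A: state machine over the remaining characters; state 5 returns False
def pvLoopA (state : Nat) (cs : List Char) : Bool :=
  match cs with
  | [] => state == 4
  | c :: rest =>
    match state with
    | 1 => pvLoopA (if PySem.Chars.isdigit c then 2 else 5) rest
    | 2 => pvLoopA (if PySem.Chars.isdigit c then 2 else if c == '/' then 3 else 5) rest
    | 3 => pvLoopA (if PySem.Chars.isdigit c then 4 else 5) rest
    | 4 => pvLoopA (if PySem.Chars.isdigit c then 4 else 5) rest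
    | _ => false

-- token("Float") is the truthy string "TK_Float"; as a Bool the function returns true there
def Adad_ashari (lexeme : String) : Bool := pvLoopA 1 lexeme.toList

-- ===== PORT B =====
def Adad_ashari_alt (lexeme : String) : Bool :=
  let i := PySem.Str.find lexeme "/"
  if i ≠ -1 ∧ PySem.Str.strIsdigit (PySem.Str.slice lexeme none (some i)) = true
           ∧ PySem.Str.strIsdigit (PySem.Str.slice lexeme (some (i+1)) none) = true
  then true else false

-- ===== PRECONDITION & SPEC =====
def Spec_Adad_ashari (lexeme : String) (out : Bool) : Prop := out = Adad_ashari_alt lexeme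
instance (lexeme : String) (out : Bool) : Decidable (Spec_Adad_ashari lexeme out) := by unfold Spec_Adad_ashari; infer_instance

-- ===== CLAIM (what is proved, stated in full; the proofs are below) =====
def Claim_equal_Adad_ashari : Prop := ∀ (lexeme : String), Dom_Adad_ashari lexeme → Spec_Adad_ashari lexeme (Adad_ashari lexeme)

-- ===== LEMMAS AND PROOFS =====

-- common reference form: first non-digit char must be '/', with digits before and after
def pvGood (cs : List Char) : Bool :=
  match cs.dropWhile PySem.Chars.isdigit with
  | '/' :: b => !(cs.takeWhile PySem.Chars.isdigit).isEmpty && PySem.Chars.strIsdigit b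
  | _ => false

theorem pvLoopA_five (cs : List Char) : pvLoopA 5 cs = false := by
  cases cs <;> simp [pvLoopA]

theorem pvLoopA_four (cs : List Char) : pvLoopA 4 cs = cs.all PySem.Chars.isdigit := by
  induction cs with
  | nil => simp [pvLoopA]
  | cons c rest ih =>
    by_cases h : PySem.Chars.isdigit c = true <;>
      simp [pvLoopA, h, ih, pvLoopA_five]

theorem pvLoopA_three (cs : List Char) : pvLoopA 3 cs = PySem.Chars.strIsdigit cs := by
  cases cs with
  | nil => simp [pvLoopA, PySem.Chars.strIsdigit]
  | cons c rest =>
    by_cases h : PySem.Chars.isdigit c = true <;>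
      simp [pvLoopA, h, pvLoopA_four, pvLoopA_five, PySem.Chars.strIsdigit]

theorem pvLoopA_two (cs : List Char) :
    pvLoopA 2 cs = (match cs.dropWhile PySem.Chars.isdigit with
                    | '/' :: b => PySem.Chars.strIsdigit b
                    | _ => false) := by
  induction cs with
  | nil => simp [pvLoopA]
  | cons c rest ih =>
    by_cases h : PySem.Chars.isdigit c = true
    · simpa [pvLoopA, h] using ih
    · by_cases hs : c = '/'
      · subst hs; simp [pvLoopA, pvLoopA_three, h]
      · have hd : PySem.Chars.isdigit c = false := by simpa using h
        simp [pvLoopA, h, pvLoopA_five, hs]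

theorem pvLoopA_one (cs : List Char) : pvLoopA 1 cs = pvGood cs := by
  cases cs with
  | nil => simp [pvLoopA, pvGood]
  | cons c rest =>
    by_cases h : PySem.Chars.isdigit c = true
    · have : pvLoopA 1 (c :: rest) = pvLoopA 2 rest := by simp [pvLoopA, h]
      rw [this, pvLoopA_two, pvGood]
      simp [h]
    · have hd : PySem.Chars.isdigit c = false := by simpa using h
      have h5 : pvLoopA 1 (c :: rest) = false := by simp [pvLoopA, h, pvLoopA_five]
      rw [h5, pvGood]
      simp [hd]
      by_cases hs : c = '/' <;> simp [hs]

-- [a] is a prefix of l iff l starts with a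
theorem pvSingleton_prefix (a : Char) (l : List Char) : [a] <+: l ↔ l.head? = some a := by
  constructor
  · rintro ⟨t, rfl⟩; rfl
  · intro h
    cases l with
    | nil => simp at h
    | cons x t => simp at h; exact ⟨t, by simp [h]⟩

theorem pvSingleton_infix (a : Char) (l : List Char) : [a] <:+: l ↔ a ∈ l := by
  constructor
  · intro h; exact h.mem (List.mem_singleton_self a)
  · intro h
    obtain ⟨s, t, rfl⟩ := List.mem_iff_append.mp h
    exact ⟨s, t, by simp⟩

-- if the first i characters are digits and the i-th is '/', dropWhile/takeWhile stop exactly there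
theorem pvDropWhile_at (i : Nat) (cs : List Char)
    (h1 : (cs.take i).all PySem.Chars.isdigit = true)
    (h2 : cs.drop i = '/' :: cs.drop (i+1)) :
    cs.dropWhile PySem.Chars.isdigit = cs.drop i ∧
    cs.takeWhile PySem.Chars.isdigit = cs.take i := by
  induction i generalizing cs with
  | zero =>
    have hc : cs = '/' :: cs.drop 1 := by simpa using h2
    have hnd : PySem.Chars.isdigit '/' = false := by decide
    rw [hc]
    simp [hnd]
  | succ n ih =>
    cases cs with
    | nil => simp at h2
    | cons c rest =>
      rw [List.take_succ_cons, List.all_cons, Bool.and_eq_true] at h1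
      obtain ⟨hc, hrest⟩ := h1
      have := ih rest hrest (by simpa using h2)
      simp [hc, this.1, this.2]

-- if some of the first i characters is not a digit while none of them is '/',
-- the first non-digit character is not '/'
theorem pvDropWhile_no_slash (i : Nat) (cs : List Char)
    (h1 : (cs.take i).all PySem.Chars.isdigit = false)
    (h2 : ∀ j, j < i → cs[j]? ≠ some '/') :
    (cs.dropWhile PySem.Chars.isdigit).head? ≠ some '/' := by
  induction i generalizing cs with
  | zero => simp at h1
  | succ n ih =>
    cases cs with
    | nil => simp at h1
    | cons c rest =>
      by_cases hc : PySem.Chars.isdigit c = true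
      · rw [List.take_succ_cons, List.all_cons, hc] at h1
        simp only [Bool.true_and] at h1
        have hrest : ∀ j, j < n → rest[j]? ≠ some '/' := by
          intro j hj
          have := h2 (j+1) (by omega)
          simpa using this
        simpa [List.dropWhile_cons, hc] using ih rest h1 hrest
      · have hd : PySem.Chars.isdigit c = false := by simpa using hc
        have hs : c ≠ '/' := by
          have := h2 0 (by omega); simpa using this
        simp [hd, hs]

theorem pvGood_false_of_head (cs : List Char)
    (h : (cs.dropWhile PySem.Chars.isdigit).head? ≠ some '/') :
    pvGood cs = false := by
  rw [pvGood]
  cases hh : cs.dropWhile PySem.Chars.isdigit with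
  | nil => rfl
  | cons d b =>
    rw [hh] at h
    simp at h
    simp [h]

theorem pvAlt_eq_good (lexeme : String) : Adad_ashari_alt lexeme = pvGood lexeme.toList := by
  unfold Adad_ashari_alt
  set cs := lexeme.toList with hcs
  by_cases hmem : '/' ∈ cs
  · -- find succeeds
    have hfind : PySem.Chars.find cs ['/'] ≠ -1 := by
      rw [PySem.Chars.find_ne_neg_one_iff]
      exact (pvSingleton_infix '/' cs).mpr hmem
    have hpos : 0 ≤ PySem.Chars.find cs ['/'] := by
      rw [PySem.Chars.find_nonneg_iff]
      exact (pvSingleton_infix '/' cs).mpr hmem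
    obtain ⟨hpre, hmin⟩ := PySem.Chars.find_spec hpos
    set i := (PySem.Chars.find cs ['/']).toNat with hi
    have hdrop : cs.drop i = '/' :: cs.drop (i+1) := by
      obtain ⟨t, ht⟩ := hpre
      have htail : cs.drop (i+1) = t := by
        rw [← List.tail_drop, ← ht]
        rfl
      rw [htail, ← ht]
      rfl
    have hnoslash : ∀ j, j < i → cs[j]? ≠ some '/' := by
      intro j hj hget
      exact hmin j hj ((pvSingleton_prefix '/' (cs.drop j)).mpr (by rw [List.head?_drop]; exact hget))
    have hfi : PySem.Str.find lexeme "/" = (i : Int) := by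
      simp only [PySem.Str.find_eq, ← hcs]
      show PySem.Chars.find cs "/".toList = (i : Int)
      have : "/".toList = ['/'] := rfl
      rw [this, hi, Int.toNat_of_nonneg hpos]
    rw [hfi]
    have hsl1 : (PySem.Str.slice lexeme none (some (i : Int))).toList = cs.take i := by
      rw [PySem.Str.toList_slice, ← hcs, PySem.Chars.slice_eq_listSlice, PySem.List.slice_to_natCast]
    have hsl2 : (PySem.Str.slice lexeme (some ((i : Int)+1)) none).toList = cs.drop (i+1) := by
      rw [PySem.Str.toList_slice, ← hcs, PySem.Chars.slice_eq_listSlice]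
      have : ((i : Int) + 1) = ((i + 1 : Nat) : Int) := by push_cast; ring
      rw [this, PySem.List.slice_from_natCast]
    have hsd1 : PySem.Str.strIsdigit (PySem.Str.slice lexeme none (some (i : Int)))
        = PySem.Chars.strIsdigit (cs.take i) := by
      rw [PySem.Str.strIsdigit_eq, hsl1]
    have hsd2 : PySem.Str.strIsdigit (PySem.Str.slice lexeme (some ((i : Int)+1)) none)
        = PySem.Chars.strIsdigit (cs.drop (i+1)) := by
      rw [PySem.Str.strIsdigit_eq, hsl2]
    by_cases hall : (cs.take i).all PySem.Chars.isdigit = true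
    · obtain ⟨hdw, htw⟩ := pvDropWhile_at i cs hall hdrop
      rw [pvGood, hdw, hdrop]
      simp only [hsd1, hsd2]
      have htk : PySem.Chars.strIsdigit (cs.take i) = !(cs.take i).isEmpty := by
        simp [PySem.Chars.strIsdigit, hall]
      rw [htk, htw]
      by_cases he : (cs.take i).isEmpty = true <;>
        by_cases hb : PySem.Chars.strIsdigit (cs.drop (i+1)) = true <;>
          simp [he, hb]
    · have hall' : (cs.take i).all PySem.Chars.isdigit = false := by simpa using hall
      rw [pvGood_false_of_head cs (pvDropWhile_no_slash i cs hall' hnoslash)]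
      have hfalse : PySem.Str.strIsdigit (PySem.Str.slice lexeme none (some (i : Int))) = false := by
        rw [hsd1]; simp [PySem.Chars.strIsdigit, hall']
      rw [if_neg]
      rintro ⟨-, h2, -⟩
      rw [hfalse] at h2
      exact Bool.false_ne_true h2
  · -- no '/' in the string: find returns -1, and pvGood cannot hit the '/' branch
    have hfi : PySem.Str.find lexeme "/" = -1 := by
      simp only [PySem.Str.find_eq, ← hcs]
      show PySem.Chars.find cs "/".toList = -1
      have : "/".toList = ['/'] := rfl
      rw [this, PySem.Chars.find_eq_neg_one_iff]
      rw [pvSingleton_infix]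
      exact hmem
    rw [hfi]
    have hgd : pvGood cs = false := by
      apply pvGood_false_of_head
      intro hh
      apply hmem
      have hsuf : cs.dropWhile PySem.Chars.isdigit <:+ cs := List.dropWhile_suffix _
      cases hd : cs.dropWhile PySem.Chars.isdigit with
      | nil => rw [hd] at hh; simp at hh
      | cons d b =>
        rw [hd] at hh
        simp at hh
        subst hh
        exact hsuf.subset (by rw [hd]; exact List.mem_cons_self)
    rw [hgd]
    simp

-- ===== VERDICT (by name: the statement is the Claim_ definition above) =====
theorem Adad_ashari_spec : Claim_equal_Adad_ashari := by
  intro lexeme _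
  unfold Spec_Adad_ashari Adad_ashari
  rw [pvLoopA_one, pvAlt_eq_good]
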